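-- pv_equiv track=rewrite | github.com/TechBeme/kickstarter | src/kickstarter_tools/exporter.py | extract_social_media_urls
-- ===== SOURCE A (Python) =====
-- from collections import defaultdict
-- from typing import Any, Dict, List
--
-- SOCIAL_NETWORKS = {
--     'instagram': ['instagram.com'],
--     'facebook': ['facebook.com'],
--     'twitter': ['twitter.com', 'x.com'],
--     'youtube': ['youtube.com'],
--     'tiktok': ['tiktok.com'],
--     'linkedin': ['linkedin.com'],
--     'patreon': ['patreon.com'],
--     'discord': ['discord.gg', 'discord.com'],
--     'twitch': ['twitch.tv'],
--     'bluesky': ['bsky.app'],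
-- }
--
-- def normalize_domain(domain: str) -> str:
--     """Normalize domain to lowercase and remove www prefix."""
--     domain = domain.lower().strip()
--     if domain.startswith('www.'):
--         domain = domain[4:]
--     return domain
--
-- def categorize_website(url: str, domain: str) -> str | None:
--     """Identify which social network a website belongs to."""
--     normalized = normalize_domain(domain)
--
--     for network, domains in SOCIAL_NETWORKS.items():
--         for net_domain in domains:
--             if normalized == net_domain or normalized.endswith('.' + net_domain):
--                 return network
--     return None
--
-- def extract_social_media_urls(websites: List[Dict[str, str]]) -> Dict[str, List[str]]:
--     """Extract and categorize social media URLs from websites list."""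
--     social_urls = defaultdict(list)
--     other_urls = []
--
--     for website in websites:
--         url = website.get('url', '').strip()
--         domain = website.get('domain', '').strip()
--
--         if not url:
--             continue
--
--         network = categorize_website(url, domain)
--
--         if network:
--             social_urls[network].append(url)
--         else:
--             other_urls.append(url)
--
--     if other_urls:
--         social_urls['other'] = other_urls
--
--     return dict(social_urls)
-- ===== SOURCE B (Python) =====
-- SOCIAL_NETWORKS = {
--     'instagram': ['instagram.com'],
--     'facebook': ['facebook.com'],
--     'twitter': ['twitter.com', 'x.com'],
--     'youtube': ['youtube.com'],
--     'tiktok': ['tiktok.com'],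
--     'linkedin': ['linkedin.com'],
--     'patreon': ['patreon.com'],
--     'discord': ['discord.gg', 'discord.com'],
--     'twitch': ['twitch.tv'],
--     'bluesky': ['bsky.app'],
-- }
--
-- # One flat lookup table: domain -> network (earlier networks inserted first).
-- _LOOKUP = {d: net for net, ds in SOCIAL_NETWORKS.items() for d in ds}
--
--
-- def _first_match(d):
--     """Walk the dot-boundary suffixes of d (longest first) and return the
--     network of the first one that is a known domain, else None."""
--     if d in _LOOKUP:
--         return _LOOKUP[d]
--     dot = d.find('.')
--     if dot == -1:
--         return None
--     return _first_match(d[dot + 1:])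
--
--
-- def _categorize(domain):
--     d = domain.lower().strip()
--     if d.startswith('www.'):
--         d = d[4:]
--     return _first_match(d)
--
--
-- def extract_social_media_urls(websites):
--     social_urls = {}
--     other_urls = []
--     for website in websites:
--         url = website.get('url', '').strip()
--         domain = website.get('domain', '').strip()
--         if not url:
--             continue
--         network = _categorize(domain)
--         if network:
--             social_urls.setdefault(network, []).append(url)
--         else:
--             other_urls.append(url)
--     if other_urls:
--         social_urls['other'] = other_urls
--     return social_urls
-- ===== Notes on version B (the rewrite author's own statement) =====
-- stated objective: idiomatic
-- what changed: Replaces the per-URL nested scan over SOCIAL_NETWORKS (equality/endswith test against every domain) with a single flat domain->network lookup table probed with the dot-boundary suffixes of the normalized domain, walking from the longest suffix to the shortest.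
import Mathlib
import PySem

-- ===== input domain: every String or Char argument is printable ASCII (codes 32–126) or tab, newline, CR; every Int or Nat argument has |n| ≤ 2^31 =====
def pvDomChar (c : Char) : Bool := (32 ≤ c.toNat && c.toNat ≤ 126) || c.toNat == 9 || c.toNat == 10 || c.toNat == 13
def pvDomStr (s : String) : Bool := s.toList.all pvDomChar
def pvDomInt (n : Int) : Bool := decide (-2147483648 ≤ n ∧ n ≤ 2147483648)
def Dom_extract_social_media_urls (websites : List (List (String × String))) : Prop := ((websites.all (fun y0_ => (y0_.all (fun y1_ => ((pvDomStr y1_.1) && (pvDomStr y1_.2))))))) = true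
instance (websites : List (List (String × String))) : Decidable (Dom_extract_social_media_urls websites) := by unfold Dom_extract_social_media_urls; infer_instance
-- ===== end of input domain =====

-- B replaces the per-URL scan over SOCIAL_NETWORKS (== / endswith per domain) by a flat
-- domain->network lookup table probed with the dot-boundary suffixes of the domain (idiomatic).


-- ===== PORT A =====
-- SOCIAL_NETWORKS, in dict insertion order
def pvNetworks : List (String × List String) :=
  [("instagram", ["instagram.com"]), ("facebook", ["facebook.com"]),
   ("twitter", ["twitter.com", "x.com"]), ("youtube", ["youtube.com"]),
   ("tiktok", ["tiktok.com"]), ("linkedin", ["linkedin.com"]),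
   ("patreon", ["patreon.com"]), ("discord", ["discord.gg", "discord.com"]),
   ("twitch", ["twitch.tv"]), ("bluesky", ["bsky.app"])]

-- normalize_domain: lower, strip, drop a leading 'www.' (domain[4:] with literal start 4 ≥ 0 is drop 4)
def pvNormalizeA (domain : String) : List Char :=
  let d := PySem.Chars.strip (PySem.Chars.lower domain.toList)
  if PySem.Chars.startswith d "www.".toList then d.drop 4 else d

-- normalized == net_domain or normalized.endswith('.' + net_domain)
def pvMatchesA (n : List Char) (d : String) : Bool :=
  n == d.toList || PySem.Chars.endswith n ('.' :: d.toList)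

-- inner 'for net_domain in domains: if …: return network' — true iff some domain matches
def pvScanInner (n : List Char) : List String → Bool
  | [] => false
  | d :: rest => if pvMatchesA n d then true else pvScanInner n rest

-- outer 'for network, domains in SOCIAL_NETWORKS.items()'
def pvScanA (n : List Char) : List (String × List String) → Option String
  | [] => none
  | (net, ds) :: rest => if pvScanInner n ds then some net else pvScanA n rest

-- categorize_website(url, domain) (url is unused by the Python too)
def pvCategorizeA (_url domain : String) : Option String :=
  pvScanA (pvNormalizeA domain) pvNetworks

-- defaultdict(list): social_urls[network].append(url)
def pvAppendA (d : PySem.Dict String (List String)) (k : String) (u : String) :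
    PySem.Dict String (List String) :=
  match PySem.Dict.get? d k with
  | some xs => PySem.Dict.insert d k (xs ++ [u])
  | none => PySem.Dict.insert d k [u]

-- one iteration of the for-loop; 'if network:' — categorize returns None or a (nonempty)
-- network name, so Python truthiness here is exactly isSome
def pvStepA (st : PySem.Dict String (List String) × List String)
    (website : List (String × String)) : PySem.Dict String (List String) × List String :=
  let url := PySem.Str.strip (PySem.Dict.getD ⟨website⟩ "url" "")
  let domain := PySem.Str.strip (PySem.Dict.getD ⟨website⟩ "domain" "")
  if url = "" then st
  else
    match pvCategorizeA url domain with
    | some net => (pvAppendA st.1 net url, st.2)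
    | none => (st.1, st.2 ++ [url])

def extract_social_media_urls (websites : List (List (String × String))) :
    List (String × List String) :=
  let st := websites.foldl pvStepA ((PySem.Dict.mk []), ([] : List String))
  (if st.2 = [] then st.1 else PySem.Dict.insert st.1 "other" st.2).items

-- ===== PORT B =====
-- _LOOKUP = {d: net for net, ds in SOCIAL_NETWORKS.items() for d in ds}
-- (keys kept as char lists; Python str equality = char-list equality)
def pvLookup : List (List Char × String) :=
  [("instagram.com".toList, "instagram"), ("facebook.com".toList, "facebook"),
   ("twitter.com".toList, "twitter"), ("x.com".toList, "twitter"),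
   ("youtube.com".toList, "youtube"), ("tiktok.com".toList, "tiktok"),
   ("linkedin.com".toList, "linkedin"), ("patreon.com".toList, "patreon"),
   ("discord.gg".toList, "discord"), ("discord.com".toList, "discord"),
   ("twitch.tv".toList, "twitch"), ("bsky.app".toList, "bluesky")]

-- 'd in _LOOKUP' / '_LOOKUP[d]' — first-match association lookup
def pvAssoc : List (List Char × String) → List Char → Option String
  | [], _ => none
  | (k, v) :: r, n => if n = k then some v else pvAssoc r n

-- dot = d.find('.');  d[dot+1:]  — none iff find returned -1 (no dot)
def pvDropToDot : List Char → Option (List Char)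
  | [] => none
  | c :: t => if c = '.' then some t else pvDropToDot t

-- _first_match, made total with a fuel counter bounded below by the length;
-- fuel d.length + 1 always suffices since each recursive call shortens d
def pvFirstMatchFuel : Nat → List Char → Option String
  | 0, _ => none
  | fuel + 1, d =>
    match pvAssoc pvLookup d with
    | some net => some net
    | none =>
      match pvDropToDot d with
      | some t => pvFirstMatchFuel fuel t
      | none => none

def pvFirstMatch (d : List Char) : Option String :=
  pvFirstMatchFuel (d.length + 1) d

-- _categorize (same normalization lines as A's normalize_domain)
def pvCategorizeB (domain : String) : Option String :=
  let d := PySem.Chars.strip (PySem.Chars.lower domain.toList)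
  let d' := if PySem.Chars.startswith d "www.".toList then d.drop 4 else d
  pvFirstMatch d'

-- social_urls.setdefault(network, []).append(url)
def pvSetdefaultAppend (d : PySem.Dict String (List String)) (k : String) (u : String) :
    PySem.Dict String (List String) :=
  match PySem.Dict.get? d k with
  | some xs => PySem.Dict.insert d k (xs ++ [u])
  | none => PySem.Dict.insert d k ([] ++ [u])

def pvStepB (st : PySem.Dict String (List String) × List String)
    (website : List (String × String)) : PySem.Dict String (List String) × List String :=
  let url := PySem.Str.strip (PySem.Dict.getD ⟨website⟩ "url" "")
  let domain := PySem.Str.strip (PySem.Dict.getD ⟨website⟩ "domain" "")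
  if url = "" then st
  else
    match pvCategorizeB domain with
    | some net => (pvSetdefaultAppend st.1 net url, st.2)
    | none => (st.1, st.2 ++ [url])

def extract_social_media_urls_alt (websites : List (List (String × String))) :
    List (String × List String) :=
  let st := websites.foldl pvStepB ((PySem.Dict.mk []), ([] : List String))
  (if st.2 = [] then st.1 else PySem.Dict.insert st.1 "other" st.2).items

-- ===== PRECONDITION & SPEC =====
def Spec_extract_social_media_urls (websites : List (List (String × String))) (out : List (String × List String)) : Prop := out = extract_social_media_urls_alt websites
instance (websites : List (List (String × String))) (out : List (String × List String)) : Decidable (Spec_extract_social_media_urls websites out) := by unfold Spec_extract_social_media_urls; infer_instance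

-- ===== CLAIM (what is proved, stated in full; the proofs are below) =====
def Claim_equal_extract_social_media_urls : Prop := ∀ (websites : List (List (String × String))), Dom_extract_social_media_urls websites → Spec_extract_social_media_urls websites (extract_social_media_urls websites)

-- ===== LEMMAS AND PROOFS =====

theorem pvDropToDot_length : ∀ {d t : List Char}, pvDropToDot d = some t → t.length < d.length := by
  intro d
  induction d with
  | nil => intro t h; simp [pvDropToDot] at h
  | cons c m ih =>
    intro t h
    simp only [pvDropToDot] at h
    split_ifs at h with hc
    · cases h; simp
    · exact Nat.lt_trans (ih h) (by simp)


-- a successful lookup means membership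
theorem pvAssoc_some_mem : ∀ {L : List (List Char × String)} {n : List Char} {v : String},
    pvAssoc L n = some v → (n, v) ∈ L := by
  intro L
  induction L with
  | nil => intro n v h; simp [pvAssoc] at h
  | cons kv r ih =>
    intro n v h
    obtain ⟨k, w⟩ := kv
    simp only [pvAssoc] at h
    split_ifs at h with hk
    · cases h; subst hk; simp
    · exact List.mem_cons_of_mem _ (ih h)

-- a failed lookup means the key differs from every key
theorem pvAssoc_none_ne : ∀ {L : List (List Char × String)} {n : List Char},
    pvAssoc L n = none → ∀ kv ∈ L, n ≠ kv.1 := by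
  intro L
  induction L with
  | nil => intro n _ kv hkv; simp at hkv
  | cons kv' r ih =>
    intro n h kv hkv
    obtain ⟨k, w⟩ := kv'
    simp only [pvAssoc] at h
    split_ifs at h with hk
    rcases List.mem_cons.mp hkv with rfl | hm
    · exact hk
    · exact ih h kv hm

-- no dot found: there is no '.' in the list
theorem pvDropToDot_none : ∀ {d : List Char}, pvDropToDot d = none → '.' ∉ d := by
  intro d
  induction d with
  | nil => intro _ h; simp at h
  | cons c m ih =>
    intro h hm
    simp only [pvDropToDot] at h
    split_ifs at h with hc
    rcases List.mem_cons.mp hm with rfl | hm'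
    · exact hc rfl
    · exact ih h hm'

-- dot-boundary suffixes shift: a '.'-headed suffix of d is either exactly the tail after
-- the first dot, or a '.'-headed suffix of that tail
theorem suffix_shift : ∀ {d t : List Char}, pvDropToDot d = some t →
    ∀ l : List Char, (('.' :: l) <:+ d ↔ l = t ∨ ('.' :: l) <:+ t) := by
  intro d
  induction d with
  | nil => intro t h; simp [pvDropToDot] at h
  | cons c m ih =>
    intro t h l
    simp only [pvDropToDot] at h
    split_ifs at h with hc
    · cases h
      subst hc
      rw [List.suffix_cons_iff]
      constructor
      · rintro (h' | h')
        · injection h' with _ h2; exact Or.inl h2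
        · exact Or.inr h'
      · rintro (rfl | h')
        · exact Or.inl rfl
        · exact Or.inr h'
    · rw [List.suffix_cons_iff]
      constructor
      · rintro (h' | h')
        · injection h' with h1 _; exact absurd h1.symm hc
        · exact (ih h l).mp h'
      · intro h'
        exact Or.inr ((ih h l).mpr h')

-- endswith is suffix
theorem endswith_iff (n p : List Char) : PySem.Chars.endswith n p = true ↔ p <:+ n := by
  simp [PySem.Chars.endswith]

-- when n is not equal to d, matching n is the same as matching the tail after the first dot
theorem matches_shift {n t : List Char} (hd : pvDropToDot n = some t) {d : String}
    (hne : n ≠ d.toList) : pvMatchesA n d = pvMatchesA t d := by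
  have key := suffix_shift hd d.toList
  rw [Bool.eq_iff_iff]
  simp only [pvMatchesA, Bool.or_eq_true, beq_iff_eq, endswith_iff]
  constructor
  · rintro (rfl | hs)
    · exact absurd rfl hne
    · rcases key.mp hs with rfl | hs'
      · exact Or.inl rfl
      · exact Or.inr hs'
  · rintro (rfl | hs)
    · exact Or.inr (key.mpr (Or.inl rfl))
    · exact Or.inr (key.mpr (Or.inr hs))

-- every domain of pvNetworks is a key of pvLookup
theorem networks_keys : ∀ p ∈ pvNetworks, ∀ d ∈ p.2, ∃ v, (d.toList, v) ∈ pvLookup := by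
  have H : ∀ p ∈ pvNetworks, ∀ d ∈ p.2, d.toList ∈ pvLookup.map Prod.fst := by decide
  intro p hp d hd
  obtain ⟨⟨k, v⟩, hv, hk⟩ := List.mem_map.mp (H p hp d hd)
  dsimp only at hk
  subst hk
  exact ⟨v, hv⟩

-- congruence for the inner scan
theorem scanInner_congr {n t : List Char} {ds : List String}
    (hm : ∀ d ∈ ds, pvMatchesA n d = pvMatchesA t d) : pvScanInner n ds = pvScanInner t ds := by
  induction ds with
  | nil => rfl
  | cons d rest ih =>
    simp only [pvScanInner]
    rw [hm d (by simp)]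
    split_ifs
    · rfl
    · exact ih (fun d' hd' => hm d' (List.mem_cons_of_mem _ hd'))

-- congruence for the outer scan
theorem scanA_congr {n t : List Char} : ∀ {P : List (String × List String)},
    (∀ p ∈ P, ∀ d ∈ p.2, pvMatchesA n d = pvMatchesA t d) → pvScanA n P = pvScanA t P := by
  intro P
  induction P with
  | nil => intro _; rfl
  | cons p rest ih =>
    intro hm
    obtain ⟨net, ds⟩ := p
    simp only [pvScanA]
    rw [scanInner_congr (hm (net, ds) (by simp))]
    split_ifs
    · rfl
    · exact ih (fun p hp d hd => hm p (List.mem_cons_of_mem _ hp) d hd)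

-- the inner scan fails when nothing matches
theorem scanInner_none {n : List Char} {ds : List String}
    (hm : ∀ d ∈ ds, pvMatchesA n d = false) : pvScanInner n ds = false := by
  induction ds with
  | nil => rfl
  | cons d rest ih =>
    simp only [pvScanInner]
    rw [hm d (by simp)]
    simp only [Bool.false_eq_true, if_false]
    exact ih (fun d' hd' => hm d' (List.mem_cons_of_mem _ hd'))

-- the scan returns none when nothing matches
theorem scanA_none {n : List Char} : ∀ {P : List (String × List String)},
    (∀ p ∈ P, ∀ d ∈ p.2, pvMatchesA n d = false) → pvScanA n P = none := by
  intro P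
  induction P with
  | nil => intro _; rfl
  | cons p rest ih =>
    intro hm
    obtain ⟨net, ds⟩ := p
    simp only [pvScanA]
    rw [scanInner_none (hm (net, ds) (by simp))]
    simp only [Bool.false_eq_true, if_false]
    exact ih (fun p hp d hd => hm p (List.mem_cons_of_mem _ hp) d hd)

-- MAIN: A's nested scan equals B's suffix walk
theorem scan_eq_fuel : ∀ (fuel : Nat) (n : List Char), n.length < fuel →
    pvScanA n pvNetworks = pvFirstMatchFuel fuel n := by
  intro fuel
  induction fuel with
  | zero => intro n h; omega
  | succ fuel ih =>
    intro n hlen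
    cases h : pvAssoc pvLookup n with
    | some net =>
      simp only [pvFirstMatchFuel, h]
      have hmem := pvAssoc_some_mem h
      simp only [pvLookup, List.mem_cons, Prod.mk.injEq] at hmem
      rcases hmem with ⟨h1, h2⟩ | ⟨h1, h2⟩ | ⟨h1, h2⟩ | ⟨h1, h2⟩ | ⟨h1, h2⟩ | ⟨h1, h2⟩ |
        ⟨h1, h2⟩ | ⟨h1, h2⟩ | ⟨h1, h2⟩ | ⟨h1, h2⟩ | ⟨h1, h2⟩ | ⟨h1, h2⟩ | hnil
      all_goals first
        | simp at hnil
        | (subst h1; subst h2; decide)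
    | none =>
      have hne := pvAssoc_none_ne h
      cases hd : pvDropToDot n with
      | none =>
        simp only [pvFirstMatchFuel, h, hd]
        have hdot := pvDropToDot_none hd
        apply scanA_none
        intro p hp d hdm
        obtain ⟨v, hv⟩ := networks_keys p hp d hdm
        have hnd : n ≠ d.toList := hne (d.toList, v) hv
        simp only [pvMatchesA]
        have h1 : (n == d.toList) = false := by simp [hnd]
        rw [h1]
        simp only [Bool.false_or]
        rw [Bool.eq_false_iff]
        intro hsuf
        exact hdot (((endswith_iff n _).mp hsuf).subset (by simp : '.' ∈ '.' :: d.toList))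
      | some t =>
        simp only [pvFirstMatchFuel, h, hd]
        have ht : t.length < fuel := Nat.lt_of_lt_of_le (pvDropToDot_length hd) (Nat.lt_succ_iff.mp hlen)
        rw [← ih t ht]
        apply scanA_congr
        intro p hp d hdm
        obtain ⟨v, hv⟩ := networks_keys p hp d hdm
        exact matches_shift hd (hne (d.toList, v) hv)

theorem cat_eq (url domain : String) : pvCategorizeA url domain = pvCategorizeB domain := by
  simp only [pvCategorizeA, pvCategorizeB, pvNormalizeA, pvFirstMatch]
  exact scan_eq_fuel _ _ (Nat.lt_succ_self _)

theorem append_eq : pvAppendA = pvSetdefaultAppend := by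
  funext d k u
  unfold pvAppendA pvSetdefaultAppend
  cases PySem.Dict.get? d k <;> rfl

theorem step_eq : pvStepA = pvStepB := by
  funext st w
  unfold pvStepA pvStepB
  simp only [cat_eq, append_eq]

-- ===== VERDICT (by name: the statement is the Claim_ definition above) =====
theorem extract_social_media_urls_spec : Claim_equal_extract_social_media_urls := by
  intro websites _
  unfold Spec_extract_social_media_urls
  unfold extract_social_media_urls extract_social_media_urls_alt
  rw [step_eq]
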